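-- pv_equiv track=rewrite | github.com/thepercyj/Puzzle-Realms | kanoodle_solver/DLX-Algo/main.py | convert_kanoodle_input
-- ===== SOURCE A (Python) =====
-- def convert_kanoodle_input(GridWidth, GridHeight, Pieces):
--     rows = []
--     for piece_idx, piece in enumerate(Pieces):
--         piece_lines = piece.split('\n')
--         piece_rows = len(piece_lines)
--         piece_cols = max(len(line) for line in piece_lines)
--
--         # Try all possible positions for this piece on the board.
--         for row in range(GridHeight - piece_rows + 1):
--             for col in range(GridWidth - piece_cols + 1):
--                 dlx_row = [f'{piece_idx}-{r}-{c}' for r in range(piece_rows) for c in range(piece_cols) if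
--                            c < len(piece_lines[r]) and piece_lines[r][c] == ' ']
--                 rows.append(dlx_row)
--     return rows
-- ===== SOURCE B (Python) =====
-- def convert_kanoodle_input(GridWidth, GridHeight, Pieces):
--     rows = []
--     for piece_idx, piece in enumerate(Pieces):
--         # One pass over the raw piece string: track (row, col), the widest line
--         # seen, and collect a label for every space cell -- no split, no grids.
--         r = c = w = 0
--         labels = []
--         for ch in piece:
--             if ch == '\n':
--                 r += 1
--                 w = max(w, c)
--                 c = 0
--             else:
--                 if ch == ' ':
--                     labels.append(f'{piece_idx}-{r}-{c}')
--                 c += 1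
--         w = max(w, c)
--         count = max(0, GridHeight - (r + 1) + 1) * max(0, GridWidth - w + 1)
--         rows.extend([list(labels) for _ in range(count)])
--     return rows
-- ===== Notes on version B (the rewrite author's own statement) =====
-- stated objective: faster
-- what changed: B drops A's split-into-lines step and nested placement loops entirely: it makes a single character-by-character pass over each raw piece string, tracking (row, col), the running maximum line width and the space-cell labels in one accumulator, then appends the closed-form number max(0,H-rows+1)*max(0,W-cols+1) of copies of the label list.
import Mathlib
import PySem

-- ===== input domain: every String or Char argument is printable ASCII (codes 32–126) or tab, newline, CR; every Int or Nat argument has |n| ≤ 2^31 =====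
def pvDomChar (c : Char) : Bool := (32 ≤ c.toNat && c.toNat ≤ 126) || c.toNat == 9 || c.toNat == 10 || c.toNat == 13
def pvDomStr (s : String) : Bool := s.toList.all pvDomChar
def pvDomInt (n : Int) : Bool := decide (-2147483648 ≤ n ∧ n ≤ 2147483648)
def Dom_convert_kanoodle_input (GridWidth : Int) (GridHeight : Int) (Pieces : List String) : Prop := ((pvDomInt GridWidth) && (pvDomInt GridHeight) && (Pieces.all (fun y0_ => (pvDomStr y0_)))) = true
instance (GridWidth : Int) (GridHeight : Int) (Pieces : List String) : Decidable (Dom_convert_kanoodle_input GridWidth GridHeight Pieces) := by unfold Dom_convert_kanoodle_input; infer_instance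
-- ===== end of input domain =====

-- B replaces A's split-into-lines + nested position loops by a single character scan
-- of each raw piece string (tracking row/col/width and collecting space-cell labels)
-- plus a closed-form placement count, instead of rebuilding the row for every position (faster, measured).

-- shared helper: the f-string label f'{idx}-{r}-{c}'
def pvLabel (idx r c : Int) : String :=
  PySem.Int.toStr idx ++ "-" ++ PySem.Int.toStr r ++ "-" ++ PySem.Int.toStr c

-- A helper: piece.split('\n'); the separator is nonempty so split? is always some
def pvSplitNl (s : String) : List String := (PySem.Str.split? s "\n").getD []

-- A helper: max(len(line) for line in lines); lines is never empty (split's output),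
-- so the none branch is unreachable
def pvMaxLen (lines : List String) : Int :=
  match PySem.List.max? lines PySem.Str.len with
  | some m => PySem.Str.len m
  | none => 0

-- ===== PORT A =====
def convert_kanoodle_input (GridWidth : Int) (GridHeight : Int) (Pieces : List String) : List (List String) :=
  (PySem.List.enumerate Pieces 0).foldl (fun rows pp =>
    let piece_lines := pvSplitNl pp.2
    let piece_rows : Int := (piece_lines.length : Int)
    let piece_cols : Int := pvMaxLen piece_lines
    (PySem.List.pyRange 0 (GridHeight - piece_rows + 1) 1).foldl (fun rows _row =>
      (PySem.List.pyRange 0 (GridWidth - piece_cols + 1) 1).foldl (fun rows _col =>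
        let dlx_row := (PySem.List.pyRange 0 piece_rows 1).flatMap (fun r =>
          (PySem.List.pyRange 0 piece_cols 1).filterMap (fun c =>
            if c < PySem.Str.len (PySem.List.pyGetD piece_lines r "") ∧
               PySem.Str.pyGet? (PySem.List.pyGetD piece_lines r "") c = some ' '
            then some (pvLabel pp.1 r c) else none))
        rows ++ [dlx_row]) rows) rows) []

-- ===== PORT B =====
-- B's inner loop body: one character of the piece string; state (r, c, w, labels)
def pvScanStep (idx : Int) (st : Int × Int × Int × List String) (ch : Char) : Int × Int × Int × List String :=
  let (r, c, w, acc) := st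
  if ch = '\n' then (r + 1, 0, max w c, acc)
  else (r, c + 1, w, if ch = ' ' then acc ++ [pvLabel idx r c] else acc)

def convert_kanoodle_input_alt (GridWidth : Int) (GridHeight : Int) (Pieces : List String) : List (List String) :=
  (PySem.List.enumerate Pieces 0).foldl (fun rows pp =>
    let st := pp.2.toList.foldl (pvScanStep pp.1) (0, 0, 0, [])
    let w := max st.2.2.1 st.2.1
    let count : Int := max 0 (GridHeight - (st.1 + 1) + 1) * max 0 (GridWidth - w + 1)
    rows ++ List.replicate count.toNat st.2.2.2) []

-- ===== PRECONDITION & SPEC =====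
def Spec_convert_kanoodle_input (GridWidth : Int) (GridHeight : Int) (Pieces : List String) (out : List (List String)) : Prop := out = convert_kanoodle_input_alt GridWidth GridHeight Pieces
instance (GridWidth : Int) (GridHeight : Int) (Pieces : List String) (out : List (List String)) : Decidable (Spec_convert_kanoodle_input GridWidth GridHeight Pieces out) := by unfold Spec_convert_kanoodle_input; infer_instance

-- ===== CLAIM (what is proved, stated in full; the proofs are below) =====
def Claim_equal_convert_kanoodle_input : Prop := ∀ (GridWidth : Int) (GridHeight : Int) (Pieces : List String), Dom_convert_kanoodle_input GridWidth GridHeight Pieces → Spec_convert_kanoodle_input GridWidth GridHeight Pieces (convert_kanoodle_input GridWidth GridHeight Pieces)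

-- ===== LEMMAS AND PROOFS =====

-- the lines of a char list, split at '\n' (reference model of str.split('\n'))
def pvConsHead (x : List Char) : List (List Char) → List (List Char)
  | [] => [x]
  | h :: t => (x ++ h) :: t

def pvLines : List Char → List (List Char)
  | [] => [[]]
  | c :: t => if c = '\n' then [] :: pvLines t else pvConsHead [c] (pvLines t)

def pvJoin : List (List Char) → List Char
  | [] => []
  | [l] => l
  | l :: ls => l ++ '\n' :: pvJoin ls

-- labels of one line starting at column c0
def pvLineLabels (idx r c0 : Int) (line : List Char) : List String :=
  (PySem.List.enumerate line c0).filterMap (fun p =>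
    if p.2 = ' ' then some (pvLabel idx r p.1) else none)

-- reference model of B's scan, line by line
def pvFoldLines (idx : Int) : Int → Int → List String → List (List Char) → Int × Int × Int × List String
  | r, w, acc, [] => (r, 0, w, acc)
  | r, w, acc, [l] => (r, (l.length : Int), w, acc ++ pvLineLabels idx r 0 l)
  | r, w, acc, l :: ls => pvFoldLines idx (r + 1) (max w (l.length : Int)) (acc ++ pvLineLabels idx r 0 l) ls

theorem pvLines_ne_nil (cs : List Char) : pvLines cs ≠ [] := by
  cases cs with
  | nil => simp [pvLines]
  | cons c t =>
    simp only [pvLines]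
    split
    · simp
    · cases h : pvLines t <;> simp [pvConsHead]

theorem pv_go_eq (fuel : Nat) (l cur : List Char) (acc : List (List Char)) (h : l.length < fuel) :
    PySem.Chars.splitOn.go ['\n'] fuel l cur acc = acc.reverse ++ pvConsHead cur.reverse (pvLines l) := by
  induction fuel generalizing l cur acc with
  | zero => omega
  | succ n ih =>
    cases l with
    | nil =>
      rw [PySem.Chars.splitOn.go]
      simp [pvLines, pvConsHead]
      omega
    | cons c rest =>
      rw [PySem.Chars.splitOn.go]
      by_cases hc : c = '\n'
      · subst hc
        rw [if_pos (by simp [List.isPrefixOf])]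
        have hdrop : List.drop (['\n'] : List Char).length ('\n' :: rest) = rest := by simp
        rw [hdrop]
        rw [ih rest [] _ (by simp only [List.length_cons] at h; omega)]
        have hpv : pvLines ('\n' :: rest) = [] :: pvLines rest := by
          rw [pvLines]
          simp
        rw [hpv]
        cases hpl : pvLines rest with
        | nil => exact absurd hpl (pvLines_ne_nil rest)
        | cons hd tl => simp [pvConsHead]
      · rw [if_neg (by simp [List.isPrefixOf]; exact fun h' => hc h'.symm)]
        rw [ih rest (c :: cur) _ (by simp only [List.length_cons] at h; omega)]
        have hpv : pvLines (c :: rest) = pvConsHead [c] (pvLines rest) := by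
          rw [pvLines]
          simp [hc]
        rw [hpv]
        cases hpl : pvLines rest with
        | nil => exact absurd hpl (pvLines_ne_nil rest)
        | cons hd tl => simp [pvConsHead]

theorem pvJoin_cons₂ (a b : List Char) (ls : List (List Char)) :
    pvJoin (a :: b :: ls) = a ++ '\n' :: pvJoin (b :: ls) := rfl

theorem pvJoin_singleton (a : List Char) : pvJoin [a] = a := rfl

theorem pv_split_eq (s : String) : pvSplitNl s = (pvLines s.toList).map String.ofList := by
  unfold pvSplitNl
  rw [PySem.Str.split?]
  have hsep : ("\n" : String).toList = ['\n'] := rfl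
  rw [hsep, PySem.Chars.split?, if_neg (by simp), PySem.Chars.splitOn]
  rw [pv_go_eq _ _ _ _ (by omega)]
  cases hpl : pvLines s.toList with
  | nil => exact absurd hpl (pvLines_ne_nil _)
  | cons hd tl => simp [pvConsHead]

theorem pvLines_no_nl (cs : List Char) : ∀ p ∈ pvLines cs, '\n' ∉ p := by
  induction cs with
  | nil =>
    intro p hp
    simp [pvLines] at hp
    simp [hp]
  | cons c t ih =>
    intro p hp
    rw [pvLines] at hp
    by_cases hc : c = '\n'
    · rw [if_pos hc] at hp
      rcases List.mem_cons.mp hp with h | h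
      · simp [h]
      · exact ih p h
    · rw [if_neg hc] at hp
      cases hpl : pvLines t with
      | nil => exact absurd hpl (pvLines_ne_nil t)
      | cons hd tl =>
        rw [hpl] at hp
        simp only [pvConsHead, List.singleton_append] at hp
        rcases List.mem_cons.mp hp with h | h
        · subst h
          intro hmem
          rcases List.mem_cons.mp hmem with h' | h'
          · exact hc h'.symm
          · exact ih hd (by simp [hpl]) h'
        · exact ih p (by simp [hpl, h])

theorem pvLines_join (cs : List Char) : pvJoin (pvLines cs) = cs := by
  induction cs with
  | nil => rfl
  | cons c t ih =>
    rw [pvLines]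
    by_cases hc : c = '\n'
    · rw [if_pos hc]
      cases hpl : pvLines t with
      | nil => exact absurd hpl (pvLines_ne_nil t)
      | cons hd tl =>
        rw [pvJoin_cons₂, ← hpl, ih, hc]
        rfl
    · rw [if_neg hc]
      cases hpl : pvLines t with
      | nil => exact absurd hpl (pvLines_ne_nil t)
      | cons hd tl =>
        simp only [pvConsHead, List.singleton_append]
        cases tl with
        | nil =>
          rw [pvJoin_singleton]
          have : pvJoin (pvLines t) = t := ih
          rw [hpl, pvJoin_singleton] at this
          rw [this]
        | cons l2 t2 =>
          rw [pvJoin_cons₂]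
          have : pvJoin (pvLines t) = t := ih
          rw [hpl, pvJoin_cons₂] at this
          rw [List.cons_append, this]

theorem pv_scan_line (idx : Int) (line : List Char) (hnl : '\n' ∉ line) (r c w : Int) (acc : List String) :
    line.foldl (pvScanStep idx) (r, c, w, acc) = (r, c + (line.length : Int), w, acc ++ pvLineLabels idx r c line) := by
  induction line generalizing c acc with
  | nil => simp [pvLineLabels, PySem.List.enumerate_nil]
  | cons ch t ih =>
    have hch : ch ≠ '\n' := fun h => hnl (by simp [h])
    have hnl' : '\n' ∉ t := fun h => hnl (by simp [h])
    rw [List.foldl_cons]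
    have hstep : pvScanStep idx (r, c, w, acc) ch
        = (r, c + 1, w, if ch = ' ' then acc ++ [pvLabel idx r c] else acc) := by
      simp [pvScanStep, hch]
    rw [hstep, ih hnl' (c + 1) _]
    have harith : c + 1 + (t.length : Int) = c + ((ch :: t).length : Int) := by simp only [List.length_cons]; push_cast; ring
    have hlist : (if ch = ' ' then acc ++ [pvLabel idx r c] else acc) ++ pvLineLabels idx r (c + 1) t
        = acc ++ pvLineLabels idx r c (ch :: t) := by
      simp only [pvLineLabels, PySem.List.enumerate_cons, List.filterMap_cons]
      by_cases hsp : ch = ' ' <;> simp [hsp]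
    rw [harith, hlist]

theorem pv_scan_join (idx : Int) (ls : List (List Char)) (hnl : ∀ p ∈ ls, '\n' ∉ p) :
    ∀ (r w : Int) (acc : List String),
      (pvJoin ls).foldl (pvScanStep idx) (r, 0, w, acc) = pvFoldLines idx r w acc ls := by
  induction ls with
  | nil => intro r w acc; rfl
  | cons l ls ih =>
    intro r w acc
    have hl : '\n' ∉ l := hnl l (by simp)
    cases ls with
    | nil =>
      rw [pvJoin_singleton, pv_scan_line idx l hl r 0 w acc, pvFoldLines]
      simp
    | cons l2 t =>
      rw [pvJoin_cons₂, List.foldl_append, pv_scan_line idx l hl r 0 w acc, List.foldl_cons]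
      have hstep : pvScanStep idx (r, 0 + (l.length : Int), w, acc ++ pvLineLabels idx r 0 l) '\n'
          = (r + 1, 0, max w (0 + (l.length : Int)), acc ++ pvLineLabels idx r 0 l) := by
        simp [pvScanStep]
      rw [hstep, ih (fun p hp => hnl p (by simp [hp])) (r + 1) _ _]
      show _ = pvFoldLines idx (r + 1) (max w ((l.length : Int))) (acc ++ pvLineLabels idx r 0 l) (l2 :: t)
      simp only [zero_add]

theorem pvFoldLines_fst (idx : Int) (ls : List (List Char)) (h : ls ≠ []) :
    ∀ (r w : Int) (acc : List String), (pvFoldLines idx r w acc ls).1 = r + (ls.length : Int) - 1 := by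
  induction ls with
  | nil => exact absurd rfl h
  | cons l t ih =>
    intro r w acc
    cases t with
    | nil => simp [pvFoldLines]
    | cons l2 t2 =>
      show (pvFoldLines idx (r + 1) (max w ((l.length : Int))) (acc ++ pvLineLabels idx r 0 l) (l2 :: t2)).1 = _
      rw [ih (by simp)]
      simp only [List.length_cons]
      push_cast
      ring

theorem pvFoldLines_cols (idx : Int) (ls : List (List Char)) (h : ls ≠ []) :
    ∀ (r w : Int) (acc : List String),
      max (pvFoldLines idx r w acc ls).2.2.1 (pvFoldLines idx r w acc ls).2.1
        = ls.foldl (fun m l => max m ((l.length : Int))) w := by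
  induction ls with
  | nil => exact absurd rfl h
  | cons l t ih =>
    intro r w acc
    cases t with
    | nil => simp [pvFoldLines]
    | cons l2 t2 =>
      show max (pvFoldLines idx (r + 1) (max w ((l.length : Int))) (acc ++ pvLineLabels idx r 0 l) (l2 :: t2)).2.2.1
            (pvFoldLines idx (r + 1) (max w ((l.length : Int))) (acc ++ pvLineLabels idx r 0 l) (l2 :: t2)).2.1 = _
      rw [ih (by simp)]
      simp only [List.foldl_cons]

theorem pvFoldLines_labels (idx : Int) (ls : List (List Char)) :
    ∀ (r w : Int) (acc : List String),
      (pvFoldLines idx r w acc ls).2.2.2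
        = acc ++ (PySem.List.enumerate ls r).flatMap (fun p => pvLineLabels idx p.1 0 p.2) := by
  induction ls with
  | nil => intro r w acc; simp [pvFoldLines, PySem.List.enumerate_nil]
  | cons l t ih =>
    intro r w acc
    cases t with
    | nil => simp [pvFoldLines, PySem.List.enumerate_cons, PySem.List.enumerate_nil]
    | cons l2 t2 =>
      show (pvFoldLines idx (r + 1) (max w ((l.length : Int))) (acc ++ pvLineLabels idx r 0 l) (l2 :: t2)).2.2.2 = _
      rw [ih]
      simp [PySem.List.enumerate_cons, List.append_assoc]

-- helper lemmas for the running max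
theorem pv_ofList_len (l : List Char) : PySem.Str.len (String.ofList l) = (l.length : Int) := by
  simp

theorem pv_foldl_max_le (ls : List (List Char)) (b : Int) :
    ∀ a, a ≤ b → (∀ x ∈ ls, (x.length : Int) ≤ b) →
      ls.foldl (fun m l => max m ((l.length : Int))) a ≤ b := by
  induction ls with
  | nil => intro a ha _; simpa
  | cons l t ih =>
    intro a ha hall
    rw [List.foldl_cons]
    exact ih _ (max_le ha (hall l (by simp))) (fun x hx => hall x (by simp [hx]))

theorem pv_init_le_foldl (ls : List (List Char)) :
    ∀ a, a ≤ ls.foldl (fun m l => max m ((l.length : Int))) a := by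
  induction ls with
  | nil => intro a; simp
  | cons l t ih =>
    intro a
    rw [List.foldl_cons]
    exact le_trans (le_max_left _ _) (ih _)

theorem pv_mem_le_foldl (ls : List (List Char)) :
    ∀ (a : Int) (x), x ∈ ls → (x.length : Int) ≤ ls.foldl (fun m l => max m ((l.length : Int))) a := by
  induction ls with
  | nil => intro a x hx; simp at hx
  | cons l t ih =>
    intro a x hx
    rw [List.foldl_cons]
    rcases List.mem_cons.mp hx with h | h
    · subst h
      exact le_trans (le_max_right _ _) (pv_init_le_foldl t _)
    · exact ih _ x h

-- max of lengths: A's pvMaxLen equals B's running max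
theorem pv_cols_eq (ls : List (List Char)) (h : ls ≠ []) :
    pvMaxLen (ls.map String.ofList) = ls.foldl (fun m l => max m ((l.length : Int))) 0 := by
  unfold pvMaxLen
  cases hm : PySem.List.max? (ls.map String.ofList) PySem.Str.len with
  | none =>
    rw [PySem.List.max?_eq_none_iff, List.map_eq_nil_iff] at hm
    exact absurd hm h
  | some m =>
    have hmem := PySem.List.max?_mem hm
    have hmax := PySem.List.max?_isMax hm
    obtain ⟨x, hx, rfl⟩ := List.mem_map.mp hmem
    show PySem.Str.len (String.ofList x) = _
    rw [pv_ofList_len]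
    apply le_antisymm
    · exact pv_mem_le_foldl ls 0 x hx
    · apply pv_foldl_max_le
      · positivity
      · intro y hy
        have := hmax (String.ofList y) (List.mem_map_of_mem hy)
        rwa [pv_ofList_len, pv_ofList_len] at this

-- A's per-line comprehension over column indices equals the enumerate form
theorem pv_max_bound (lines : List String) :
    ∀ line ∈ lines, PySem.Str.len line ≤ pvMaxLen lines := by
  intro line hline
  unfold pvMaxLen
  cases hm : PySem.List.max? lines PySem.Str.len with
  | none =>
    rw [PySem.List.max?_eq_none_iff] at hm
    subst hm; simp at hline
  | some m => exact PySem.List.max?_isMax hm line hline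

theorem pv_flatMap_congr {α β : Type} (l : List α) (f g : α → List β)
    (h : ∀ x ∈ l, f x = g x) : l.flatMap f = l.flatMap g := by
  induction l with
  | nil => rfl
  | cons y t ih =>
    simp only [List.flatMap_cons, h y (by simp), ih (fun x hx => h x (by simp [hx]))]

theorem pv_line_eq (line : String) (pc : Int) (hpc : PySem.Str.len line ≤ pc)
    (F : Int → String) :
    (PySem.List.pyRange 0 pc 1).filterMap (fun c =>
        if c < PySem.Str.len line ∧ PySem.Str.pyGet? line c = some ' '
        then some (F c) else none)
      = (PySem.List.enumerate line.toList 0).filterMap (fun cch =>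
          if cch.2 = ' ' then some (F cch.1) else none) := by
  have hL : (0:Int) ≤ PySem.Str.len line := by simp
  rw [PySem.List.pyRange_one_append 0 (PySem.Str.len line) pc hL hpc,
      List.filterMap_append]
  have h2 : (PySem.List.pyRange (PySem.Str.len line) pc 1).filterMap (fun c =>
      if c < PySem.Str.len line ∧ PySem.Str.pyGet? line c = some ' '
      then some (F c) else none) = [] := by
    rw [List.filterMap_eq_nil_iff]
    intro c hc
    rw [PySem.List.mem_pyRange_one] at hc
    have hno : ¬ (c < PySem.Str.len line ∧ PySem.Str.pyGet? line c = some ' ') := by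
      rintro ⟨h1, _⟩; omega
    rw [if_neg hno]
  rw [h2, List.append_nil]
  rw [PySem.List.enumerate_eq_map_pyRange line.toList ' ', List.filterMap_map]
  have hlen : PySem.Str.len line = PySem.List.len line.toList := by
    rw [PySem.Str.len_eq]; simp
  rw [hlen]
  apply List.filterMap_congr
  intro c hc
  rw [PySem.List.mem_pyRange_one] at hc
  have hc0 : (0:Int) ≤ c := by simpa using hc.1
  have hcl : c < (line.toList.length : Int) := by simpa using hc.2
  have hlt : c.toNat < line.toList.length := by omega
  have hget : PySem.Str.pyGet? line c = some (line.toList[c.toNat]) := by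
    rw [PySem.Str.pyGet?_eq, PySem.Chars.pyGet?_eq_listPyGet?,
        PySem.List.pyGet?_of_nonneg line.toList hc0]
    simp [List.getElem?_eq_getElem hlt]
  have hgetD : PySem.List.pyGetD line.toList c ' ' = line.toList[c.toNat] := by
    rw [PySem.List.pyGetD_of_nonneg line.toList ' ' hc0,
        List.getD_eq_getElem line.toList ' ' hlt]
  have hcond : c < PySem.Str.len line := by rw [hlen]; simpa using hcl
  simp only [Function.comp, hget, hgetD, Option.some_inj]
  by_cases hch : line.toList[c.toNat] = ' '
  · simp only [hch, and_true]
    rw [if_pos (show c < PySem.List.len line.toList by simpa using hcl), if_pos trivial]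
  · simp [hch]

def pvPieceRow (idx : Int) (lines : List String) : List String :=
  (PySem.List.enumerate lines 0).flatMap (fun rl => pvLineLabels idx rl.1 0 rl.2.toList)

theorem pv_row_eq0 (idx : Int) (lines : List String) (pc : Int)
    (hpc : ∀ line ∈ lines, PySem.Str.len line ≤ pc) :
    (PySem.List.pyRange 0 ((lines.length : Int)) 1).flatMap (fun r =>
        (PySem.List.pyRange 0 pc 1).filterMap (fun c =>
          if c < PySem.Str.len (PySem.List.pyGetD lines r "") ∧
             PySem.Str.pyGet? (PySem.List.pyGetD lines r "") c = some ' '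
          then some (pvLabel idx r c) else none))
      = pvPieceRow idx lines := by
  unfold pvPieceRow
  rw [PySem.List.enumerate_eq_map_pyRange lines ""]
  rw [List.flatMap_map]
  have hlen : ((lines.length : Nat) : Int) = PySem.List.len lines := by simp
  rw [hlen]
  apply pv_flatMap_congr
  intro r hr
  rw [PySem.List.mem_pyRange_one] at hr
  have hr0 : (0:Int) ≤ r := hr.1
  have hrl : r.toNat < lines.length := by
    have := hr.2; rw [← hlen] at this; omega
  have hmem : PySem.List.pyGetD lines r "" ∈ lines := by
    rw [PySem.List.pyGetD_of_nonneg lines "" hr0,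
        List.getD_eq_getElem lines "" hrl]
    exact List.getElem_mem hrl
  exact pv_line_eq _ pc (hpc _ hmem) _

theorem pv_enumerate_map {α β : Type} (f : α → β) (xs : List α) (s : Int) :
    PySem.List.enumerate (xs.map f) s = (PySem.List.enumerate xs s).map (fun p => (p.1, f p.2)) := by
  induction xs generalizing s with
  | nil => simp [PySem.List.enumerate_nil]
  | cons x t ih => simp [PySem.List.enumerate_cons, ih]

theorem pvPieceRow_map (idx : Int) (ls : List (List Char)) :
    pvPieceRow idx (ls.map String.ofList)
      = (PySem.List.enumerate ls 0).flatMap (fun p => pvLineLabels idx p.1 0 p.2) := by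
  unfold pvPieceRow
  rw [pv_enumerate_map, List.flatMap_map]
  apply pv_flatMap_congr
  intro p _
  simp

-- A's dlx_row comprehension equals the enumerate/flatMap form over the char lines
theorem pv_row_eq (idx : Int) (ls : List (List Char)) :
    (PySem.List.pyRange 0 (((ls.map String.ofList).length : Int)) 1).flatMap (fun r =>
        (PySem.List.pyRange 0 (pvMaxLen (ls.map String.ofList)) 1).filterMap (fun c =>
          if c < PySem.Str.len (PySem.List.pyGetD (ls.map String.ofList) r "") ∧
             PySem.Str.pyGet? (PySem.List.pyGetD (ls.map String.ofList) r "") c = some ' '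
          then some (pvLabel idx r c) else none))
      = (PySem.List.enumerate ls 0).flatMap (fun p => pvLineLabels idx p.1 0 p.2) := by
  rw [pv_row_eq0 idx (ls.map String.ofList) (pvMaxLen (ls.map String.ofList)) (pv_max_bound _)]
  exact pvPieceRow_map idx ls

theorem pv_foldl_append_one {α β : Type} (l : List β) (acc : List α) (x : α) :
    l.foldl (fun a _ => a ++ [x]) acc = acc ++ List.replicate l.length x := by
  induction l generalizing acc with
  | nil => simp
  | cons y t ih => simp [List.foldl_cons, ih, List.replicate_succ, List.append_assoc]

theorem pv_foldl_append_rep {α β : Type} (l : List β) (acc : List α) (x : α) (m : Nat) :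
    l.foldl (fun a _ => a ++ List.replicate m x) acc = acc ++ List.replicate (l.length * m) x := by
  induction l generalizing acc with
  | nil => simp
  | cons y t ih =>
    simp only [List.foldl_cons, ih, List.length_cons]
    rw [Nat.succ_mul, Nat.add_comm, List.replicate_add, List.append_assoc]

theorem pv_count_toNat (a b : Int) :
    (PySem.List.pyRange 0 a 1).length * (PySem.List.pyRange 0 b 1).length
      = (max 0 a * max 0 b).toNat := by
  rw [PySem.List.length_pyRange_one, PySem.List.length_pyRange_one]
  have ha : (0:Int) ≤ max 0 a := le_max_left _ _
  have hb : (0:Int) ≤ max 0 b := le_max_left _ _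
  have : ((max 0 a * max 0 b).toNat : Int) = ((max 0 a).toNat : Int) * ((max 0 b).toNat : Int) := by
    rw [Int.toNat_of_nonneg (mul_nonneg ha hb), Int.toNat_of_nonneg ha, Int.toNat_of_nonneg hb]
  have h1 : (a - 0).toNat = (max 0 a).toNat := by omega
  have h2 : (b - 0).toNat = (max 0 b).toNat := by omega
  rw [h1, h2]
  omega

-- ===== VERDICT (by name: the statement is the Claim_ definition above) =====
theorem convert_kanoodle_input_spec : Claim_equal_convert_kanoodle_input := by
  intro GridWidth GridHeight Pieces _
  unfold Spec_convert_kanoodle_input convert_kanoodle_input convert_kanoodle_input_alt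
  apply PySem.List.foldl_congr_mem
  intro rows pp _
  simp only []
  have hls := pvLines_ne_nil pp.2.toList
  have hscan := pv_scan_join pp.1 (pvLines pp.2.toList) (pvLines_no_nl pp.2.toList) 0 0 []
  rw [pvLines_join pp.2.toList] at hscan
  rw [hscan]
  rw [pvFoldLines_fst pp.1 _ hls, pvFoldLines_cols pp.1 _ hls, pvFoldLines_labels]
  rw [pv_split_eq pp.2]
  rw [pv_row_eq pp.1 (pvLines pp.2.toList)]
  simp only [pv_foldl_append_one]
  rw [pv_foldl_append_rep, pv_count_toNat, pv_cols_eq _ hls]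
  simp only [List.length_map]
  have hL : (0:Int) + ((pvLines pp.2.toList).length : Int) - 1 + 1 = ((pvLines pp.2.toList).length : Int) := by ring
  rw [hL, List.nil_append]
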